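-- pv_equiv track=rewrite | github.com/hamasl/IDATT2502_Project | preprocessing/numericizer.py | convert_to_numerical_values
-- ===== SOURCE A (Python) =====
-- def convert_to_numerical_values(tokens: [[]]) -> ([[]], int, int):
--     """
--     Converts given tokens to numerical values. If a token is an id,
--     the function will convert it into a negative value, and keep track of
--     smallest id value. If a token is not an id, the function
--     will convert it into a positive value instead. The function also keeps
--     track of the biggest positive value.
--
--     :param tokens: 2D array of tokens
--     :return: 2D array with numerical values, smallest id value, max positive value
--     """
--     min_id_val = -1
--     dictionary = []
--     num_values = tokens.copy()
--     for (i, function) in enumerate(tokens):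
--         for (j, token) in enumerate(function):
--             if token[0:2:1] == "id":
--                 val = -(int(token[2:]) + 1)
--                 num_values[i][j] = val
--                 if min_id_val > val:
--                     min_id_val = val
--             else:
--                 if token not in dictionary:
--                     dictionary.append(token)
--                 num_values[i][j] = dictionary.index(token)
--     max_value = len(dictionary) - 1
--     return num_values, min_id_val, max_value
-- ===== SOURCE B (Python) =====
-- def convert_to_numerical_values(tokens: [[]]) -> ([[]], int, int):
--     """Two-pass re-implementation: pass 1 builds a first-seen vocabulary dict
--     (token -> index) over non-id tokens and computes min_id_val over id tokens;
--     pass 2 maps every cell through that table. Like the original, it mutates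
--     the shared inner lists of tokens in place (num_values = tokens.copy())."""
--     num_values = tokens.copy()
--     vocab = {}
--     min_id_val = -1
--     for function in tokens:
--         for token in function:
--             if token[0:2:1] == "id":
--                 v = -(int(token[2:]) + 1)
--                 if v < min_id_val:
--                     min_id_val = v
--             elif token not in vocab:
--                 vocab[token] = len(vocab)
--     for i, function in enumerate(tokens):
--         for j, token in enumerate(function):
--             if token[0:2:1] == "id":
--                 num_values[i][j] = -(int(token[2:]) + 1)
--             else:
--                 num_values[i][j] = vocab[token]
--     return num_values, min_id_val, len(vocab) - 1
-- ===== Notes on version B (the rewrite author's own statement) =====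
-- stated objective: faster
-- what changed: Replaces the single interleaved pass with O(V) list membership tests and dictionary.index scans per token by a two-pass scheme: one pass builds a hash vocabulary (token -> first-seen index) and the min id value, a second pass maps each cell through the table, so the inner linear scans disappear.
import Mathlib
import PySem

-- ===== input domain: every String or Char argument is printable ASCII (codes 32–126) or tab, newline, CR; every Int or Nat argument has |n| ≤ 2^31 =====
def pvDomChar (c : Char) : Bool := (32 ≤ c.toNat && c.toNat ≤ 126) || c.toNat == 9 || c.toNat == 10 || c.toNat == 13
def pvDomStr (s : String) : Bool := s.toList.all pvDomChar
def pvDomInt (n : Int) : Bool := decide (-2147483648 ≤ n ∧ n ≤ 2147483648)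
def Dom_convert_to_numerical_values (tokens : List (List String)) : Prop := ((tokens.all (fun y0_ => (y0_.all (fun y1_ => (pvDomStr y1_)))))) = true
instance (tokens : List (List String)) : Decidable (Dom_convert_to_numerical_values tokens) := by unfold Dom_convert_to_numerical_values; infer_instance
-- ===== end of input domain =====

-- B replaces A's interleaved pass (linear `in dictionary` / `dictionary.index` scans per
-- token) by a vocabulary-table pass plus a mapping pass. Both Pythons mutate the shared
-- inner lists of `tokens` (via the shallow copy); the equivalence proved here is about
-- the RETURN value.

-- token[0:2:1] == "id"  (step 1 ≡ plain slice; exact)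
def pvIsId (t : String) : Bool := PySem.Str.slice t (some 0) (some 2) == "id"
-- -(int(token[2:]) + 1); Pre_ guarantees int() does not raise, so the getD 0 default is never used
def pvIdVal (t : String) : Int := -((PySem.Int.ofStr? (PySem.Str.slice t (some 2) none)).getD 0 + 1)

-- ===== PORT A =====
-- single pass; state = (rows built so far, min_id_val, dictionary); dictionary.index via PySem.List.index?
def convert_to_numerical_values (tokens : List (List String)) : List (List Int) × Int × Int :=
  let res := tokens.foldl
    (fun (acc : List (List Int) × Int × List String) function =>
      let inner := function.foldl
        (fun (st : List Int × Int × List String) token =>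
          if pvIsId token then
            let val := pvIdVal token
            (st.1 ++ [val], if st.2.1 > val then val else st.2.1, st.2.2)
          else
            let d := if token ∈ st.2.2 then st.2.2 else st.2.2 ++ [token]
            (st.1 ++ [((PySem.List.index? d token).getD 0 : Int)], st.2.1, d))
        ([], acc.2.1, acc.2.2)
      (acc.1 ++ [inner.1], inner.2.1, inner.2.2))
    ([], -1, [])
  (res.1, res.2.1, (res.2.2.length : Int) - 1)

-- ===== PORT B =====
-- pass 1: (vocab : token -> first-seen index, min_id_val); pass 2: map every cell through vocab.
-- vocab[token] in pass 2 cannot raise (every non-id token was inserted in pass 1): getD 0 default unused.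
def convert_to_numerical_values_alt (tokens : List (List String)) : List (List Int) × Int × Int :=
  let p := tokens.foldl
    (fun (st : PySem.Dict String Int × Int) function =>
      function.foldl
        (fun (st : PySem.Dict String Int × Int) token =>
          if pvIsId token then
            let v := pvIdVal token
            (st.1, if v < st.2 then v else st.2)
          else if st.1.contains token then st
          else (st.1.insert token (st.1.size : Int), st.2))
        st)
    (PySem.Dict.empty, -1)
  (tokens.map (fun function =>
      function.map (fun token =>
        if pvIsId token then pvIdVal token else (p.1.get? token).getD 0)),
   p.2, (p.1.size : Int) - 1)

-- ===== PRECONDITION & SPEC =====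
-- Pre_ excludes exactly the inputs on which A raises ValueError: a token starting with
-- "id" whose remainder is not accepted by Python's int().
def Pre_convert_to_numerical_values (tokens : List (List String)) : Prop :=
  ∀ function ∈ tokens, ∀ token ∈ function, pvIsId token = true →
    (PySem.Int.ofStr? (PySem.Str.slice token (some 2) none)).isSome = true
instance (tokens : List (List String)) : Decidable (Pre_convert_to_numerical_values tokens) := by unfold Pre_convert_to_numerical_values; infer_instance
def pvWitness_convert_to_numerical_values : List (List String) := [["id3", "foo", "id0"], ["foo", "bar", "id3"]]
def Spec_convert_to_numerical_values (tokens : List (List String)) (out : List (List Int) × Int × Int) : Prop := out = convert_to_numerical_values_alt tokens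
instance (tokens : List (List String)) (out : List (List Int) × Int × Int) : Decidable (Spec_convert_to_numerical_values tokens out) := by unfold Spec_convert_to_numerical_values; infer_instance

-- ===== CLAIM (what is proved, stated in full; the proofs are below) =====
def Claim_equal_convert_to_numerical_values : Prop := ∀ (tokens : List (List String)), Dom_convert_to_numerical_values tokens → Pre_convert_to_numerical_values tokens → Spec_convert_to_numerical_values tokens (convert_to_numerical_values tokens)


-- ===== LEMMAS AND PROOFS =====

-- A's dictionary update for a non-id token
def pvAddU (d : List String) (t : String) : List String := if t ∈ d then d else d ++ [t]
-- the numeric value of a cell, read off a (final) dictionary D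
def pvCell (D : List String) (t : String) : Int :=
  if pvIsId t then pvIdVal t else ((PySem.List.index? D t).getD 0 : Int)
-- dictionary after one row / after a list of rows
def pvDr (d : List String) (row : List String) : List String :=
  row.foldl (fun d t => if pvIsId t then d else pvAddU d t) d
def pvDtot (d : List String) (rows : List (List String)) : List String := rows.foldl pvDr d
-- min_id_val after one row / after a list of rows
def pvMr (m : Int) (row : List String) : Int :=
  row.foldl (fun m t => if pvIsId t then (if pvIdVal t < m then pvIdVal t else m) else m) m
def pvMtot (m : Int) (rows : List (List String)) : Int := rows.foldl pvMr m
-- B's vocabulary after one row / after a list of rows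
def pvVr (v : PySem.Dict String Int) (row : List String) : PySem.Dict String Int :=
  row.foldl (fun v t => if pvIsId t then v
    else if v.contains t then v else v.insert t (v.size : Int)) v
def pvVtot (v : PySem.Dict String Int) (rows : List (List String)) : PySem.Dict String Int :=
  rows.foldl pvVr v

-- the dictionary only grows by appending
theorem pvDr_extend (row : List String) : ∀ (d : List String), ∃ ys, pvDr d row = d ++ ys := by
  induction row with
  | nil => intro d; exact ⟨[], by simp [pvDr]⟩
  | cons t rest ih =>
    intro d
    by_cases h : pvIsId t = true
    · obtain ⟨ys, hys⟩ := ih d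
      exact ⟨ys, by simpa [pvDr, h] using hys⟩
    · obtain ⟨ys, hys⟩ := ih (pvAddU d t)
      by_cases hm : t ∈ d
      · exact ⟨ys, by simpa [pvDr, h, pvAddU, hm] using hys⟩
      · exact ⟨[t] ++ ys, by simp only [pvDr, List.foldl_cons, h, if_false, Bool.false_eq_true] at *
                             simpa [pvAddU, hm] using hys⟩

theorem pvDtot_extend (rows : List (List String)) : ∀ (d : List String), ∃ ys, pvDtot d rows = d ++ ys := by
  induction rows with
  | nil => intro d; exact ⟨[], by simp [pvDtot]⟩
  | cons r rest ih =>
    intro d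
    obtain ⟨ys, hys⟩ := pvDr_extend r d
    obtain ⟨zs, hzs⟩ := ih (pvDr d r)
    exact ⟨ys ++ zs, by simp [pvDtot] at *; rw [hzs, hys, List.append_assoc]⟩

theorem mem_pvDr_of_mem (d : List String) (t : String) (hd : t ∈ d) (row : List String) :
    t ∈ pvDr d row := by
  obtain ⟨ys, hys⟩ := pvDr_extend row d
  rw [hys]; exact List.mem_append_left _ hd

theorem mem_pvAddU_self (d : List String) (t : String) : t ∈ pvAddU d t := by
  by_cases h : t ∈ d <;> simp [pvAddU, h]

theorem mem_pvDr (row : List String) : ∀ (d : List String) (t : String),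
    t ∈ row → pvIsId t = false → t ∈ pvDr d row := by
  induction row with
  | nil => intro d t h; simp at h
  | cons s rest ih =>
    intro d t ht hid
    rcases List.mem_cons.mp ht with h | h
    · subst h
      simp only [pvDr, List.foldl_cons, hid, if_false, Bool.false_eq_true]
      exact mem_pvDr_of_mem _ _ (mem_pvAddU_self d t) rest
    · by_cases hs : pvIsId s = true
      · simpa [pvDr, hs] using ih d t h hid
      · simp only [pvDr, List.foldl_cons, hs, if_false, Bool.false_eq_true]
        exact ih (pvAddU d s) t h hid

theorem mem_pvDtot (rows : List (List String)) : ∀ (d : List String) (r : List String) (t : String),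
    r ∈ rows → t ∈ r → pvIsId t = false → t ∈ pvDtot d rows := by
  induction rows with
  | nil => intro d r t h; simp at h
  | cons r0 rest ih =>
    intro d r t hr ht hid
    rcases List.mem_cons.mp hr with h | h
    · subst h
      have h1 : t ∈ pvDr d r := mem_pvDr r d t ht hid
      obtain ⟨ys, hys⟩ := pvDtot_extend rest (pvDr d r)
      simp only [pvDtot, List.foldl_cons]
      show t ∈ pvDtot (pvDr d r) rest
      rw [hys]; exact List.mem_append_left _ h1
    · simpa [pvDtot] using ih (pvDr d r0) r t h ht hid

-- a cell value is stable under extending the dictionary, once the token is in it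
theorem pvCell_stable (D ys : List String) (t : String) (hmem : t ∈ D) :
    pvCell (D ++ ys) t = pvCell D t := by
  by_cases h : pvIsId t = true
  · simp [pvCell, h]
  · simp only [pvCell, h, if_false, Bool.false_eq_true]
    rw [PySem.List.index?_append_of_mem ys hmem]

-- ===== characterization of port A's folds =====

theorem pvA_row (row : List String) : ∀ (r0 : List Int) (m : Int) (d : List String),
    row.foldl
      (fun (st : List Int × Int × List String) token =>
        if pvIsId token then
          let val := pvIdVal token
          (st.1 ++ [val], if st.2.1 > val then val else st.2.1, st.2.2)
        else
          let d := if token ∈ st.2.2 then st.2.2 else st.2.2 ++ [token]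
          (st.1 ++ [((PySem.List.index? d token).getD 0 : Int)], st.2.1, d))
      (r0, m, d)
    = (r0 ++ row.map (pvCell (pvDr d row)), pvMr m row, pvDr d row) := by
  induction row with
  | nil => intro r0 m d; simp [pvDr, pvMr]
  | cons t rest ih =>
    intro r0 m d
    by_cases h : pvIsId t = true
    · simp only [List.foldl_cons, h, if_true]
      rw [ih]
      have hD : pvDr d (t :: rest) = pvDr d rest := by simp [pvDr, h]
      have hM : pvMr m (t :: rest) = pvMr (if pvIdVal t < m then pvIdVal t else m) rest := by
        simp [pvMr, h]
      rw [hD, hM]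
      simp [pvCell, h, gt_iff_lt]
    · simp only [List.foldl_cons, h, if_false, Bool.false_eq_true]
      rw [ih]
      have hD : pvDr d (t :: rest) = pvDr (pvAddU d t) rest := by
        simp [pvDr, h, pvAddU]
      have hM : pvMr m (t :: rest) = pvMr m rest := by simp [pvMr, h]
      rw [hD, hM]
      have hmem : t ∈ pvAddU d t := mem_pvAddU_self d t
      obtain ⟨ys, hys⟩ := pvDr_extend rest (pvAddU d t)
      have hcell : pvCell (pvDr (pvAddU d t) rest) t
          = ((PySem.List.index? (pvAddU d t) t).getD 0 : Int) := by
        rw [hys, pvCell_stable _ _ _ hmem]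
        simp [pvCell, h]
      simp only [pvAddU] at *
      rw [List.map_cons, hcell]
      simp

theorem pvA_go (rows : List (List String)) : ∀ (acc0 : List (List Int)) (m : Int) (d : List String),
    rows.foldl
      (fun (acc : List (List Int) × Int × List String) function =>
        let inner := function.foldl
          (fun (st : List Int × Int × List String) token =>
            if pvIsId token then
              let val := pvIdVal token
              (st.1 ++ [val], if st.2.1 > val then val else st.2.1, st.2.2)
            else
              let d := if token ∈ st.2.2 then st.2.2 else st.2.2 ++ [token]
              (st.1 ++ [((PySem.List.index? d token).getD 0 : Int)], st.2.1, d))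
          ([], acc.2.1, acc.2.2)
        (acc.1 ++ [inner.1], inner.2.1, inner.2.2))
      (acc0, m, d)
    = (acc0 ++ rows.map (fun r => r.map (pvCell (pvDtot d rows))), pvMtot m rows, pvDtot d rows) := by
  induction rows with
  | nil => intro acc0 m d; simp [pvDtot, pvMtot]
  | cons r rest ih =>
    intro acc0 m d
    simp only [List.foldl_cons]
    rw [pvA_row r [] m d]
    rw [ih]
    have hD : pvDtot d (r :: rest) = pvDtot (pvDr d r) rest := by simp [pvDtot]
    have hM : pvMtot m (r :: rest) = pvMtot (pvMr m r) rest := by simp [pvMtot]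
    rw [hD, hM]
    obtain ⟨ys, hys⟩ := pvDtot_extend rest (pvDr d r)
    have hrow : r.map (pvCell (pvDr d r)) = r.map (pvCell (pvDtot (pvDr d r) rest)) := by
      apply List.map_congr_left
      intro t ht
      rw [hys]
      by_cases hid : pvIsId t = true
      · simp [pvCell, hid]
      · exact (pvCell_stable _ _ _ (mem_pvDr r d t ht (by simpa using hid))).symm
    rw [List.map_cons, hrow]
    simp

-- ===== characterization of port B's first pass =====

theorem pvB_row (row : List String) : ∀ (v : PySem.Dict String Int) (m : Int),
    row.foldl
      (fun (st : PySem.Dict String Int × Int) token =>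
        if pvIsId token then
          let vv := pvIdVal token
          (st.1, if vv < st.2 then vv else st.2)
        else if st.1.contains token then st
        else (st.1.insert token (st.1.size : Int), st.2))
      (v, m)
    = (pvVr v row, pvMr m row) := by
  induction row with
  | nil => intro v m; simp [pvVr, pvMr]
  | cons t rest ih =>
    intro v m
    by_cases h : pvIsId t = true
    · simp only [List.foldl_cons, h, if_true]
      rw [ih]
      simp [pvVr, pvMr, h]
    · simp only [List.foldl_cons, h, if_false, Bool.false_eq_true]
      by_cases hc : v.contains t = true
      · simp only [hc, if_true]
        rw [ih]
        simp [pvVr, pvMr, h, hc]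
      · simp only [hc, if_false, Bool.false_eq_true]
        rw [ih]
        simp only [pvVr, pvMr, List.foldl_cons, h, if_false, Bool.false_eq_true, hc]

theorem pvB_go (rows : List (List String)) : ∀ (v : PySem.Dict String Int) (m : Int),
    rows.foldl
      (fun (st : PySem.Dict String Int × Int) function =>
        function.foldl
          (fun (st : PySem.Dict String Int × Int) token =>
            if pvIsId token then
              let vv := pvIdVal token
              (st.1, if vv < st.2 then vv else st.2)
            else if st.1.contains token then st
            else (st.1.insert token (st.1.size : Int), st.2))
          st)
      (v, m)
    = (pvVtot v rows, pvMtot m rows) := by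
  induction rows with
  | nil => intro v m; simp [pvVtot, pvMtot]
  | cons r rest ih =>
    intro v m
    simp only [List.foldl_cons]
    rw [pvB_row r v m, ih]
    simp [pvVtot, pvMtot]

-- ===== the invariant tying B's vocabulary to A's dictionary =====

def pvInv (v : PySem.Dict String Int) (d : List String) : Prop :=
  (∀ t, v.get? t = (PySem.List.index? d t).map (fun n => (n : Int))) ∧ v.size = d.length

theorem pvInv_contains (v : PySem.Dict String Int) (d : List String) (hinv : pvInv v d)
    (t : String) : v.contains t = decide (t ∈ d) := by
  rw [PySem.Dict.contains_eq_isSome_get?, hinv.1 t]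
  by_cases h : t ∈ d
  · obtain ⟨k, hk⟩ := Option.isSome_iff_exists.mp ((PySem.List.index?_isSome_iff d t).mpr h)
    rw [hk]
    simp [h]
  · rw [(PySem.List.index?_eq_none_iff d t).mpr h]
    simp [h]

theorem pvInv_step (v : PySem.Dict String Int) (d : List String) (hinv : pvInv v d)
    (t : String) :
    pvInv (if v.contains t then v else v.insert t (v.size : Int)) (pvAddU d t) := by
  by_cases h : t ∈ d
  · rw [pvInv_contains v d hinv t]
    simp only [h, decide_true, if_true, pvAddU]
    exact hinv
  · rw [pvInv_contains v d hinv t]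
    simp only [h, decide_false, if_false, Bool.false_eq_true, pvAddU]
    constructor
    · intro t'
      by_cases he : t' = t
      · subst he
        have h1 : PySem.List.index? (d ++ [t']) t' = some d.length :=
          PySem.List.index?_append_singleton_self d t' h
        rw [PySem.Dict.get?_insert_self, h1, hinv.2]
        simp
      · rw [PySem.Dict.get?_insert_of_ne _ _ he, hinv.1 t']
        have h2 : PySem.List.index? (d ++ [t]) t' = PySem.List.index? d t' := by
          by_cases hm : t' ∈ d
          · exact PySem.List.index?_append_of_mem [t] hm
          · rw [(PySem.List.index?_eq_none_iff _ _).mpr hm,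
                (PySem.List.index?_eq_none_iff _ _).mpr (by simp [hm, he])]
        rw [h2]
    · rw [PySem.Dict.size_insert]
      rw [pvInv_contains v d hinv t]
      simp [h, hinv.2]

theorem pvInv_row (row : List String) : ∀ (v : PySem.Dict String Int) (d : List String),
    pvInv v d → pvInv (pvVr v row) (pvDr d row) := by
  induction row with
  | nil => intro v d h; simpa [pvVr, pvDr] using h
  | cons t rest ih =>
    intro v d h
    by_cases hid : pvIsId t = true
    · have := ih v d h
      simpa [pvVr, pvDr, hid] using this
    · have h1 := pvInv_step v d h t
      have := ih _ _ h1
      by_cases hc : v.contains t = true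
      · simpa [pvVr, pvDr, hid, hc] using (by simpa [hc] using this)
      · simpa [pvVr, pvDr, hid, hc] using (by simpa [hc] using this)

theorem pvInv_go (rows : List (List String)) : ∀ (v : PySem.Dict String Int) (d : List String),
    pvInv v d → pvInv (pvVtot v rows) (pvDtot d rows) := by
  induction rows with
  | nil => intro v d h; simpa [pvVtot, pvDtot] using h
  | cons r rest ih =>
    intro v d h
    have := ih (pvVr v r) (pvDr d r) (pvInv_row r v d h)
    simpa [pvVtot, pvDtot] using this

theorem pvInv_empty : pvInv PySem.Dict.empty [] := by
  constructor
  · intro t; simp [PySem.Dict.get?_empty, PySem.List.index?_eq_idxOf?]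
  · simp [PySem.Dict.size_empty]

-- lookup in B's final vocabulary agrees with A's cell values
theorem pvCell_eq (tokens : List (List String)) (r : List String) (t : String)
    (hr : r ∈ tokens) (ht : t ∈ r) :
    (if pvIsId t then pvIdVal t
     else ((pvVtot PySem.Dict.empty tokens).get? t).getD 0)
    = pvCell (pvDtot [] tokens) t := by
  have hinv := pvInv_go tokens PySem.Dict.empty [] pvInv_empty
  by_cases hid : pvIsId t = true
  · simp [pvCell, hid]
  · have hmem : t ∈ pvDtot [] tokens := mem_pvDtot tokens [] r t hr ht (by simpa using hid)
    obtain ⟨k, hk⟩ := Option.isSome_iff_exists.mp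
      ((PySem.List.index?_isSome_iff _ _).mpr hmem)
    simp only [hid, if_false, Bool.false_eq_true, pvCell]
    rw [hinv.1 t, hk]
    simp

-- ===== VERDICT (by name: the statement is the Claim_ definition above) =====
theorem convert_to_numerical_values_spec : Claim_equal_convert_to_numerical_values := by
  intro tokens _hDom _hPre
  unfold Spec_convert_to_numerical_values
  unfold convert_to_numerical_values convert_to_numerical_values_alt
  rw [pvA_go tokens [] (-1) [], pvB_go tokens PySem.Dict.empty (-1)]
  have hinv := pvInv_go tokens PySem.Dict.empty [] pvInv_empty
  simp only [List.nil_append]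
  refine Prod.ext ?_ (Prod.ext ?_ ?_)
  · simp only
    apply List.map_congr_left
    intro r hr
    apply List.map_congr_left
    intro t ht
    exact (pvCell_eq tokens r t hr ht).symm
  · rfl
  · simp only
    rw [hinv.2]
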